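-- pv_equiv track=rewrite | github.com/petrizsolt/Ipv4-Calculator | Main.py | ipConverter
-- ===== SOURCE A (Python) =====
-- def decToBin(num):
--     binary = ""
--     while num != 0:
--         if num % 2 == 0:
--             binary += "0"
--         else:
--             binary += "1"
--         num = num/2
--         num = int(num)
--     # Ha rövidebb a bináris szám mint 8 bit, feltölti az elejét 0-kal
--     if len(binary) < 8:
--         for i in range(0, 8-len(binary)):
--             binary += "0"
--
--     return binary[::-1]
--
-- def binToDec(num):
--     decimal = 0
--     for i in range(0, len(num)):
--         if num[i] != "0" and num[i] != "1":
--             return "error"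
--         if num[i] == "1":
--             decimal = decimal + 2**(len(num)-1 - i)
--     decimal = str(decimal)
--     return decimal
--
-- def ipConverter(ip):
--     ip_4bit = ip.split(".")
--     ip_res = ""
--     if len(ip_4bit[0]) > 3:
--         for i in range(0, len(ip_4bit)):
--             ip_res += binToDec(ip_4bit[i])
--             if i != len(ip_4bit)-1:
--                 ip_res += "."
--     else:
--         for i in range(0, len(ip_4bit)):
--             ip_res += decToBin(int(ip_4bit[i]))
--             if i != len(ip_4bit)-1:
--                 ip_res += "."
--
--     return ip_res
-- ===== SOURCE B (Python) =====
-- def ipConverter(ip):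
--     parts = ip.split(".")
--     if len(parts[0]) > 3:
--         octets = []
--         for p in parts:
--             if all(c in "01" for c in p):
--                 v = 0
--                 for c in p:
--                     v = 2 * v + (c == "1")
--                 octets.append(str(v))
--             else:
--                 octets.append("error")
--     else:
--         octets = [format(int(p), "08b") for p in parts]
--     return ".".join(octets)
-- ===== Notes on version B (the rewrite author's own statement) =====
-- stated objective: idiomatic
-- what changed: Binary-to-decimal: A's per-index power sum with an early error return becomes a single-pass Horner evaluation guarded by an up-front all-binary-digits check; decimal-to-binary: A's float-halving while loop with manual zero-fill and reversal becomes one closed-form zero-padded eight-wide binary format call; the index-and-dot accumulation becomes a join over a list of octets.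
-- intended difference: On dotted-decimal inputs containing a negative octet, A's truncating halve loop silently drops the sign and returns the magnitude's unsigned binary, while B keeps a leading minus before the zero-padded binary digits, the intended representation of a signed value. — e.g. on ipConverter("-1.0"): A returns "00000001.00000000", B returns "-0000001.00000000"
-- outside the precondition, e.g. on ipConverter('1.2.xx'): A raises ValueError, B raises ValueError
import Mathlib
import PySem

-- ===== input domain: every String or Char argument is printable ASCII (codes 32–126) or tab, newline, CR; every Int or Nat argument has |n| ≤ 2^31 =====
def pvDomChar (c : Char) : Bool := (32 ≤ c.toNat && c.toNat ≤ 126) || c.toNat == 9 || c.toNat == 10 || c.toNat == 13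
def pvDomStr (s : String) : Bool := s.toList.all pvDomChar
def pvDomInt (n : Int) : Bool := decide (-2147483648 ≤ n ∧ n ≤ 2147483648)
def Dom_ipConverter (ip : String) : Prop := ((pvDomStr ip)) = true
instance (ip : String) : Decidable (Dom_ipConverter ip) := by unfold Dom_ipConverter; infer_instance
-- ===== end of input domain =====

-- B replaces A's per-index power sums and float-halving bit loop by a single-pass Horner
-- evaluation and the closed-form format(int(p), '08b'); return value only, no mutation.

-- ===== PORT A =====
-- while num != 0: collect '0'/'1' from num % 2; num = int(num/2).
-- int(num/2) is PySem.Int.truncdiv num 2, exact for |num| < 2^53 (guaranteed by Pre_).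
-- The fuel num.natAbs only makes the loop structurally total; it never cuts it short
-- (decToBinGo_fuel below), so the steps are exactly A's.
def decToBinGo (fuel : Nat) (num : Int) (binary : List Char) : List Char :=
  match fuel with
  | 0 => binary
  | fuel + 1 =>
    if num = 0 then binary
    else
      decToBinGo fuel (PySem.Int.truncdiv num 2)
        (binary ++ [if PySem.Int.mod num 2 = 0 then '0' else '1'])

def decToBinLoop (num : Int) (binary : List Char) : List Char :=
  decToBinGo num.natAbs num binary

-- binary := decToBinLoop num ""; pad with the range loop if len < 8; return binary[::-1]
def decToBin (num : Int) : List Char :=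
  (if (decToBinLoop num []).length < 8 then
      -- for i in range(0, 8-len(binary)): binary += "0"
      (PySem.List.pyRange 0 (8 - ((decToBinLoop num []).length : Int)) 1).foldl
        (fun b _ => b ++ ['0']) (decToBinLoop num [])
    else decToBinLoop num []).reverse

-- for i in range(0, len(num)): early return "error"; 2**(len(num)-1-i) is 2^rest.length
def binToDecLoop (cs : List Char) (decimal : Int) : List Char :=
  match cs with
  | [] => PySem.Int.toChars decimal                 -- str(decimal)
  | c :: rest =>
    if c ≠ '0' ∧ c ≠ '1' then ['e', 'r', 'r', 'o', 'r']
    else binToDecLoop rest (if c = '1' then decimal + 2 ^ rest.length else decimal)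

def ipConverterCore (parts : List (List Char)) : List Char :=
  if 3 < (PySem.List.pyGetD parts 0 []).length then         -- len(ip_4bit[0]) > 3
    (PySem.List.pyRange 0 ((parts.length : Int)) 1).foldl
      (fun res i =>
        if i ≠ ((parts.length : Int)) - 1 then
          (res ++ binToDecLoop (PySem.List.pyGetD parts i []) 0) ++ ['.']
        else res ++ binToDecLoop (PySem.List.pyGetD parts i []) 0) []
  else
    -- int(ip_4bit[i]) raises ValueError on none: excluded by Pre_, .getD 0 is dead there
    (PySem.List.pyRange 0 ((parts.length : Int)) 1).foldl
      (fun res i =>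
        if i ≠ ((parts.length : Int)) - 1 then
          (res ++ decToBin ((PySem.Int.ofChars? (PySem.List.pyGetD parts i [])).getD 0)) ++ ['.']
        else res ++ decToBin ((PySem.Int.ofChars? (PySem.List.pyGetD parts i [])).getD 0)) []

def ipConverter (ip : String) : String :=
  String.ofList (ipConverterCore (PySem.Chars.splitOn ip.toList ['.']))  -- ip.split(".")

-- ===== PORT B =====
-- all(c in "01" for c in p), then Horner: v = 2*v + (c == "1")
def binOctet_alt (p : List Char) : List Char :=
  if p.all (fun c => c == '0' || c == '1') then
    PySem.Int.toChars (p.foldl (fun v c => 2 * v + (if c == '1' then 1 else 0)) (0 : Int))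
  else ['e', 'r', 'r', 'o', 'r']

-- format(v, "08b"): binary digits of v ('-' first if negative), zero-filled to width 8
def decOctet_alt (v : Int) : List Char :=
  PySem.Chars.zfill (PySem.Int.toBinChars v) 8

def ipConverter_alt (ip : String) : String :=
  let parts := PySem.Chars.splitOn ip.toList ['.']
  if 3 < (PySem.List.pyGetD parts 0 []).length then
    String.ofList (PySem.Chars.join ['.'] (parts.map binOctet_alt))
  else
    String.ofList (PySem.Chars.join ['.']
      (parts.map (fun p => decOctet_alt ((PySem.Int.ofChars? p).getD 0))))

-- ===== PRECONDITION & SPEC =====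
-- Pre_ excludes inputs that take the decimal->binary branch (first octet at most 3 chars)
-- in which some octet is not a valid int() literal (A raises ValueError) or has magnitude
-- at least 2^53 (A's float true division num/2 corrupts the result, and beyond 2^1024 the
-- int->float conversion raises OverflowError).
def Pre_ipConverter (ip : String) : Prop :=
  let parts := PySem.Chars.splitOn ip.toList ['.']
  3 < (PySem.List.pyGetD parts 0 []).length ∨
    ∀ p ∈ parts, ((PySem.Int.ofChars? p).any (fun v => v.natAbs < 2 ^ 53)) = true
instance (ip : String) : Decidable (Pre_ipConverter ip) := by unfold Pre_ipConverter; infer_instance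

def pvWitness_ipConverter : String := "192.168.0.1"

-- On dotted-decimal inputs containing a negative octet, A's truncating halve loop silently
-- drops the sign and returns the magnitude's unsigned binary, while B keeps a leading minus
-- before the zero-padded binary digits, the intended representation of a signed value.
def D_ipConverter (ip : String) : Prop :=
  (ip.toList.takeWhile (· ≠ '.')).length ≤ 3 ∧
    ∃ p ∈ PySem.Chars.splitOn ip.toList ['.'],
      ((PySem.Int.ofChars? p).any (fun v => decide (v < 0))) = true
instance (ip : String) : Decidable (D_ipConverter ip) := by unfold D_ipConverter; infer_instance

def Spec_ipConverter (ip : String) (out : String) : Prop := ¬ D_ipConverter ip → out = ipConverter_alt ip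
instance (ip : String) (out : String) : Decidable (Spec_ipConverter ip out) := by unfold Spec_ipConverter; infer_instance

def pvDiffWitness_ipConverter : String := "-1.0"
def pvDiffWitnessOut_ipConverter : String × String := ("00000001.00000000", "-0000001.00000000")

-- ===== CLAIM (what is proved, stated in full; the proofs are below) =====
def Claim_unchanged_ipConverter : Prop := ∀ (ip : String), Dom_ipConverter ip → Pre_ipConverter ip → Spec_ipConverter ip (ipConverter ip)
def Claim_changed_ipConverter : Prop := Dom_ipConverter (pvDiffWitness_ipConverter) ∧ Pre_ipConverter (pvDiffWitness_ipConverter) ∧ D_ipConverter (pvDiffWitness_ipConverter) ∧ ipConverter (pvDiffWitness_ipConverter) = pvDiffWitnessOut_ipConverter.1 ∧ ipConverter_alt (pvDiffWitness_ipConverter) = pvDiffWitnessOut_ipConverter.2 ∧ pvDiffWitnessOut_ipConverter.1 ≠ pvDiffWitnessOut_ipConverter.2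

def Claim_exact_ipConverter : Prop := ∀ (ip : String), Dom_ipConverter ip → Pre_ipConverter ip → D_ipConverter ip → ipConverter ip ≠ ipConverter_alt ip

-- ===== LEMMAS AND PROOFS =====

-- LSB-first bits of a natural number, as A's while-loop collects them
def lsbBits (n : Nat) : List Char :=
  if h : n = 0 then []
  else (if n % 2 = 0 then '0' else '1') :: lsbBits (n / 2)
decreasing_by omega

lemma decToBinGo_eq (fuel : Nat) : ∀ (num : Int), num.natAbs ≤ fuel → ∀ (acc : List Char),
    decToBinGo fuel num acc = acc ++ lsbBits num.natAbs := by
  induction fuel with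
  | zero =>
    intro num hk acc
    have h0 : num = 0 := by omega
    rw [decToBinGo, h0, lsbBits]
    simp
  | succ fuel ih =>
    intro num hk acc
    by_cases h : num = 0
    · rw [decToBinGo, if_pos h, h, lsbBits]
      simp
    · rw [decToBinGo, if_neg h]
      have h3 : (PySem.Int.truncdiv num 2).natAbs = num.natAbs / 2 := by
        simp only [PySem.Int.truncdiv, Int.natAbs_tdiv]; rfl
      rw [ih _ (by rw [h3]; omega) _]
      conv_rhs => rw [lsbBits]
      rw [dif_neg (by simpa using h), h3]
      have h2 : (PySem.Int.mod num 2 = 0) ↔ (num.natAbs % 2 = 0) := by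
        rw [PySem.Int.mod_eq_zero_iff_dvd]; omega
      rw [if_congr h2 rfl rfl]
      simp

lemma decToBinLoop_eq (num : Int) (acc : List Char) :
    decToBinLoop num acc = acc ++ lsbBits num.natAbs :=
  decToBinGo_eq num.natAbs num (le_refl _) acc

lemma lsbBits_mem (n : Nat) : ∀ c ∈ lsbBits n, c = '0' ∨ c = '1' := by
  induction n using Nat.strong_induction_on with
  | _ n ih =>
    by_cases h : n = 0
    · rw [lsbBits]; simp [h]
    · rw [lsbBits, dif_neg h]
      intro c hc
      rcases List.mem_cons.mp hc with rfl | hc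
      · split_ifs with hp
        · exact Or.inl rfl
        · exact Or.inr rfl
      · exact ih (n / 2) (by omega) c hc

lemma toDigitsCore_eq (f : Nat) : ∀ (n : Nat) (ds : List Char), n ≠ 0 → n < f →
    Nat.toDigitsCore 2 f n ds = (lsbBits n).reverse ++ ds := by
  induction f with
  | zero => intro n ds hn hf; omega
  | succ f ih =>
    intro n ds hn hf
    have hd : (n % 2).digitChar = if n % 2 = 0 then '0' else '1' := by
      rcases Nat.mod_two_eq_zero_or_one n with h2 | h2 <;> simp [h2, Nat.digitChar]
    by_cases h2 : n / 2 = 0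
    · simp only [Nat.toDigitsCore, h2, if_pos]
      conv_rhs => rw [lsbBits, dif_neg hn, h2, lsbBits]
      simp [hd]
    · simp only [Nat.toDigitsCore, h2]
      rw [ih (n / 2) (_ :: ds) h2 (by omega)]
      conv_rhs => rw [lsbBits, dif_neg hn]
      simp [hd]

lemma lsbBits_reverse (n : Nat) (h : n ≠ 0) :
    (lsbBits n).reverse = Nat.toDigits 2 n := by
  rw [Nat.toDigits, toDigitsCore_eq (n + 1) n [] h (by omega)]
  simp

lemma lsbBits_ne_nil (n : Nat) (h : n ≠ 0) : lsbBits n ≠ [] := by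
  rw [lsbBits, dif_neg h]; simp

lemma decToBin_eq (v : Int) (hv0 : 0 ≤ v) : decToBin v = decOctet_alt v := by
  have hnv : (v.natAbs : Int) = v := Int.natAbs_of_nonneg hv0
  have hTB : PySem.Int.toBinChars v = Nat.toDigits 2 v.natAbs := by
    simp only [PySem.Int.toBinChars]
    rw [if_neg (by omega)]
    congr 1
    omega
  by_cases hv : v.natAbs = 0
  · have hz : v = 0 := by omega
    subst hz
    unfold decToBin decOctet_alt
    rw [decToBinLoop_eq, List.nil_append]
    rw [show Int.natAbs 0 = 0 from rfl, show lsbBits 0 = [] from by rw [lsbBits]; simp]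
    decide
  · unfold decToBin decOctet_alt
    rw [decToBinLoop_eq, List.nil_append, hTB]
    have hrev : (lsbBits v.natAbs).reverse = Nat.toDigits 2 v.natAbs := lsbBits_reverse _ hv
    have hlenTD : (Nat.toDigits 2 v.natAbs).length = (lsbBits v.natAbs).length := by
      rw [← hrev, List.length_reverse]
    by_cases hlen : (lsbBits v.natAbs).length < 8
    · rw [if_pos hlen]
      have hfold : (PySem.List.pyRange 0 (8 - ((lsbBits v.natAbs).length : Int)) 1).foldl
          (fun b _ => b ++ ['0']) (lsbBits v.natAbs)
          = lsbBits v.natAbs ++ List.replicate (8 - (lsbBits v.natAbs).length) '0' := by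
        rw [PySem.List.foldl_append_singleton_eq_map (fun _ => '0')]
        congr 1
        rw [List.map_const', PySem.List.length_pyRange_one]
        congr 1
        omega
      rw [hfold, List.reverse_append, List.reverse_replicate, hrev]
      obtain ⟨c, rest, hcr⟩ : ∃ c rest, Nat.toDigits 2 v.natAbs = c :: rest := by
        rcases hcase : Nat.toDigits 2 v.natAbs with _ | ⟨c, rest⟩
        · rw [← hrev] at hcase
          exact absurd (List.reverse_eq_nil_iff.mp hcase) (lsbBits_ne_nil _ hv)
        · exact ⟨c, rest, rfl⟩
      have hc01 : c = '0' ∨ c = '1' := by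
        apply lsbBits_mem v.natAbs
        have : c ∈ (lsbBits v.natAbs).reverse := by
          rw [hrev, hcr]; exact List.mem_cons_self
        simpa using this
      rw [hcr]
      simp only [PySem.Chars.zfill]
      rw [if_neg (by rw [show (c :: rest).length = (lsbBits v.natAbs).length from by
            rw [← hcr]; exact hlenTD]; omega)]
      rw [if_neg (by rcases hc01 with rfl | rfl <;> simp)]
      congr 1
      rw [show (c :: rest).length = (lsbBits v.natAbs).length from by
            rw [← hcr]; exact hlenTD]
      congr 1
    · rw [if_neg hlen, hrev]
      simp only [PySem.Chars.zfill]
      rw [if_pos (by rw [hlenTD]; omega)]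

lemma horner_shift (p : List Char) (a : Int) :
    p.foldl (fun v c => 2 * v + (if c == '1' then 1 else 0)) a
      = a * 2 ^ p.length + p.foldl (fun v c => 2 * v + (if c == '1' then 1 else 0)) 0 := by
  induction p generalizing a with
  | nil => simp
  | cons c rest ih =>
    simp only [List.foldl_cons, List.length_cons]
    rw [ih, ih (2 * 0 + if c == '1' then 1 else 0)]
    ring

lemma binToDecLoop_eq (p : List Char) (d : Int) :
    binToDecLoop p d =
      if p.all (fun c => c == '0' || c == '1') then
        PySem.Int.toChars (d + p.foldl (fun v c => 2 * v + (if c == '1' then 1 else 0)) 0)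
      else ['e', 'r', 'r', 'o', 'r'] := by
  induction p generalizing d with
  | nil => simp [binToDecLoop]
  | cons c rest ih =>
    by_cases hc : c ≠ '0' ∧ c ≠ '1'
    · obtain ⟨h0, h1⟩ := hc
      simp only [binToDecLoop, if_pos (And.intro h0 h1)]
      simp [List.all_cons, h0, h1]
    · have hc' : (c == '0' || c == '1') = true := by
        rcases not_and_or.mp hc with h | h <;> simp [not_not.mp h]
      simp only [binToDecLoop, if_neg hc, ih, List.all_cons, hc', Bool.true_and,
        List.foldl_cons]
      by_cases hall : rest.all (fun c => c == '0' || c == '1') = true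
      · rw [if_pos hall, if_pos hall]
        congr 1
        rw [horner_shift rest (2 * 0 + if c == '1' then 1 else 0)]
        rcases not_and_or.mp hc with h | h <;> rw [not_not.mp h] <;> simp <;> ring
      · rw [if_neg hall, if_neg hall]

lemma join_concat (xs : List (List Char)) (y : List Char) :
    PySem.Chars.join ['.'] (xs ++ [y]) = (xs.map (· ++ ['.'])).flatten ++ y := by
  induction xs with
  | nil => rw [List.nil_append, PySem.Chars.join_singleton]; simp
  | cons x xs ih =>
    rcases hxy : xs ++ [y] with _ | ⟨z, zs⟩
    · exact absurd hxy (by simp)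
    · rw [List.cons_append, hxy, PySem.Chars.join_cons_cons, ← hxy, ih]
      simp [List.append_assoc]

lemma go_acc (sep : List Char) : ∀ (fuel : Nat) (l cur : List Char) (acc : List (List Char)),
    PySem.Chars.splitOn.go sep fuel l cur acc = acc.reverse ++ PySem.Chars.splitOn.go sep fuel l cur [] := by
  intro fuel
  induction fuel with
  | zero => intro l cur acc; simp [PySem.Chars.splitOn.go]
  | succ fuel ih =>
    intro l cur acc
    cases l with
    | nil => simp [PySem.Chars.splitOn.go]
    | cons c rest =>
      rw [PySem.Chars.splitOn.go, PySem.Chars.splitOn.go]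
      by_cases hp : sep.isPrefixOf (c :: rest) = true
      · rw [if_pos hp, if_pos hp, ih _ _ (_ :: acc), ih _ _ [List.reverse cur]]
        simp
      · rw [if_neg hp, if_neg hp, ih _ _ acc]

lemma go_head : ∀ (fuel : Nat) (l cur : List Char), l.length < fuel →
    ∃ rest, PySem.Chars.splitOn.go ['.'] fuel l cur [] = (cur.reverse ++ l.takeWhile (· ≠ '.')) :: rest := by
  intro fuel
  induction fuel with
  | zero => intro l cur h; omega
  | succ fuel ih =>
    intro l cur h
    cases l with
    | nil => exact ⟨[], by simp [PySem.Chars.splitOn.go]⟩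
    | cons c rest =>
      rw [PySem.Chars.splitOn.go]
      by_cases hc : c = '.'
      · have hp : (['.'] : List Char).isPrefixOf (c :: rest) = true := by simp [hc, List.isPrefixOf]
        subst hc
        rw [if_pos hp, go_acc]
        refine ⟨PySem.Chars.splitOn.go ['.'] fuel (List.drop ['.'].length ('.' :: rest)) [] [], ?_⟩
        simp [List.takeWhile]
      · have hp : ¬ (['.'] : List Char).isPrefixOf (c :: rest) = true := by
          simp [List.isPrefixOf]; exact fun h => hc h.symm
        rw [if_neg hp]
        obtain ⟨r, hr⟩ := ih rest (c :: cur) (by simpa using Nat.lt_of_succ_lt_succ h)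
        refine ⟨r, ?_⟩
        rw [hr]
        simp [List.takeWhile, hc]

lemma splitOn_head_dot (cs : List Char) :
    ∃ rest, PySem.Chars.splitOn cs ['.'] = cs.takeWhile (· ≠ '.') :: rest := by
  simpa [PySem.Chars.splitOn] using go_head (cs.length + 1) cs [] (by omega)

lemma dotJoin (f : List Char → List Char) (parts : List (List Char)) :
    (PySem.List.pyRange 0 ((parts.length : Int)) 1).foldl
      (fun res i =>
        if i ≠ (parts.length : Int) - 1 then (res ++ f (PySem.List.pyGetD parts i [])) ++ ['.']
        else res ++ f (PySem.List.pyGetD parts i [])) []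
    = PySem.Chars.join ['.'] (parts.map f) := by
  rcases List.eq_nil_or_concat parts with rfl | ⟨init, last, rfl⟩
  · simp [PySem.Chars.join_nil, PySem.List.pyRange_one_eq_nil (le_refl (0 : Int))]
  · rw [List.concat_eq_append]
    have hlen : (((init ++ [last]).length : Int)) = (init.length : Int) + 1 := by
      rw [List.length_append, List.length_cons, List.length_nil]; push_cast; ring
    rw [hlen, PySem.List.pyRange_one_succ_right (Int.natCast_nonneg _), List.foldl_append,
      List.foldl_cons, List.foldl_nil]
    rw [if_neg (by omega)]
    have hlast : PySem.List.pyGetD (init ++ [last]) ((init.length : Int)) [] = last := by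
      rw [PySem.List.pyGetD_natCast]
      simp [List.getD]
    rw [hlast]
    rw [PySem.List.foldl_congr_mem _ _
      (fun res i => res ++ (f (PySem.List.pyGetD init i []) ++ ['.'])) _ ?hcongr]
    case hcongr =>
      intro acc i hi
      rw [PySem.List.mem_pyRange_one] at hi
      rw [if_pos (by omega)]
      have hget : PySem.List.pyGetD (init ++ [last]) i [] = PySem.List.pyGetD init i [] := by
        have h2 : i < ((init ++ [last]).length : Int) := by
          rw [List.length_append, List.length_cons, List.length_nil]; push_cast; omega
        rw [PySem.List.pyGetD_eq_getElem _ _ hi.1 h2,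
          PySem.List.pyGetD_eq_getElem _ _ hi.1 hi.2]
        exact List.getElem_append_left (by omega)
      rw [hget, List.append_assoc]
    rw [PySem.List.foldl_append_eq_flatMap, List.nil_append, List.flatMap_def]
    rw [show (fun i => f (PySem.List.pyGetD init i []) ++ ['.'])
        = (fun p => f p ++ ['.']) ∘ (fun i => PySem.List.pyGetD init i []) from rfl]
    rw [← List.map_map, PySem.List.map_pyGetD_pyRange_zero']
    rw [List.map_append, List.map_singleton, join_concat, List.map_map]
    rfl

lemma mem_join_elim (sep : List Char) : ∀ (ls : List (List Char)) (c : Char),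
    c ∈ PySem.Chars.join sep ls → c ∈ sep ∨ ∃ l ∈ ls, c ∈ l := by
  intro ls
  induction ls with
  | nil => intro c hc; rw [PySem.Chars.join_nil] at hc; cases hc
  | cons x ls ih =>
    intro c hc
    cases ls with
    | nil =>
      rw [PySem.Chars.join_singleton] at hc
      exact Or.inr ⟨x, List.mem_cons_self, hc⟩
    | cons y ys =>
      rw [PySem.Chars.join_cons_cons] at hc
      rcases List.mem_append.mp hc with h | h
      · rcases List.mem_append.mp h with h | h
        · exact Or.inr ⟨x, List.mem_cons_self, h⟩
        · exact Or.inl h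
      · rcases ih c h with h | ⟨l, hl, hcl⟩
        · exact Or.inl h
        · exact Or.inr ⟨l, List.mem_cons_of_mem _ hl, hcl⟩

lemma mem_join_intro (sep : List Char) : ∀ (ls : List (List Char)) (l : List Char),
    l ∈ ls → ∀ c ∈ l, c ∈ PySem.Chars.join sep ls := by
  intro ls
  induction ls with
  | nil => intro l hl; cases hl
  | cons x ls ih =>
    intro l hl c hc
    cases ls with
    | nil =>
      rw [PySem.Chars.join_singleton]
      rcases List.mem_singleton.mp hl with rfl
      exact hc
    | cons y ys =>
      rw [PySem.Chars.join_cons_cons]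
      rcases List.mem_cons.mp hl with rfl | hl
      · exact List.mem_append.mpr (Or.inl (List.mem_append.mpr (Or.inl hc)))
      · exact List.mem_append.mpr (Or.inr (ih l hl c hc))

lemma neg_octet_has_dash (v : Int) (hv : v < 0) : '-' ∈ decOctet_alt v := by
  simp only [decOctet_alt, PySem.Int.toBinChars, if_pos hv, PySem.Chars.zfill]
  split_ifs <;> simp

lemma decToBin_mem (v : Int) : ∀ c ∈ decToBin v, c = '0' ∨ c = '1' := by
  intro c hc
  unfold decToBin at hc
  simp only [decToBinLoop_eq, List.nil_append] at hc
  rw [List.mem_reverse] at hc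
  split_ifs at hc with hlen
  · rw [PySem.List.foldl_append_singleton_eq_map (fun _ => '0')] at hc
    rcases List.mem_append.mp hc with h | h
    · exact lsbBits_mem _ c h
    · exact Or.inl (by rcases List.mem_map.mp h with ⟨_, _, rfl⟩; rfl)
  · exact lsbBits_mem _ c hc

-- ===== VERDICT (by name: the statements are the Claim_ definitions above) =====
theorem ipConverter_spec : Claim_unchanged_ipConverter := by
  unfold Claim_unchanged_ipConverter
  intro ip _ _ hD
  unfold ipConverter ipConverter_alt ipConverterCore
  by_cases hb : 3 < (PySem.List.pyGetD (PySem.Chars.splitOn ip.toList ['.']) 0 []).length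
  · rw [if_pos hb, if_pos hb]
    have h := dotJoin (fun p => binToDecLoop p 0) (PySem.Chars.splitOn ip.toList ['.'])
    simp only [] at h
    rw [h]
    congr 1
    refine congrArg _ (List.map_congr_left ?_)
    intro p _
    rw [binToDecLoop_eq]
    simp [binOctet_alt]
  · rw [if_neg hb, if_neg hb]
    have h := dotJoin (fun p => decToBin ((PySem.Int.ofChars? p).getD 0))
      (PySem.Chars.splitOn ip.toList ['.'])
    simp only [] at h
    rw [h]
    congr 1
    refine congrArg _ (List.map_congr_left ?_)
    intro p hp
    obtain ⟨tl, hsp⟩ := splitOn_head_dot ip.toList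
    have hlen3 : (ip.toList.takeWhile (· ≠ '.')).length ≤ 3 := by
      rw [hsp] at hb
      rw [PySem.List.pyGetD_ofNat'] at hb
      simpa using Nat.le_of_not_lt hb
    unfold D_ipConverter at hD
    rw [not_and] at hD
    have hall := hD hlen3
    simp only [not_exists, not_and] at hall
    rw [decToBin_eq]
    rcases ho : PySem.Int.ofChars? p with _ | v
    · simp
    · have := hall p hp
      rw [ho] at this
      simp only [Option.any_some, decide_eq_true_eq] at this
      simp only [Option.getD_some]
      omega

theorem ipConverter_changed : Claim_changed_ipConverter := by
  unfold Claim_changed_ipConverter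
  decide

theorem ipConverter_tight : Claim_exact_ipConverter := by
  unfold Claim_exact_ipConverter
  intro ip _ _ hD heq
  obtain ⟨hlen3, p, hp, hneg⟩ := hD
  rcases ho : PySem.Int.ofChars? p with _ | v
  · rw [ho] at hneg; simp at hneg
  · rw [ho] at hneg
    simp only [Option.any_some, decide_eq_true_eq] at hneg
    obtain ⟨tl, hsp⟩ := splitOn_head_dot ip.toList
    have hb : ¬ 3 < (PySem.List.pyGetD (PySem.Chars.splitOn ip.toList ['.']) 0 []).length := by
      rw [hsp, PySem.List.pyGetD_ofNat']
      simpa using hlen3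
    unfold ipConverter ipConverter_alt ipConverterCore at heq
    rw [if_neg hb, if_neg hb] at heq
    have h := dotJoin (fun p => decToBin ((PySem.Int.ofChars? p).getD 0))
      (PySem.Chars.splitOn ip.toList ['.'])
    simp only [] at h
    rw [h] at heq
    have hlists := congrArg String.toList heq
    simp only [String.toList_ofList] at hlists
    have hmemB : '-' ∈ PySem.Chars.join ['.']
        ((PySem.Chars.splitOn ip.toList ['.']).map
          (fun q => decOctet_alt ((PySem.Int.ofChars? q).getD 0))) := by
      refine mem_join_intro _ _ _ (List.mem_map_of_mem hp) '-' ?_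
      rw [ho]
      exact neg_octet_has_dash v hneg
    rw [← hlists] at hmemB
    rcases mem_join_elim _ _ _ hmemB with hs | ⟨l, hl, hcl⟩
    · simp at hs
    · obtain ⟨q, hq, rfl⟩ := List.mem_map.mp hl
      rcases decToBin_mem _ _ hcl with hc | hc <;> simp at hc
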